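-- pv_equiv track=rewrite | github.com/Meisterschulen-am-Ostbahnhof-Munchen/.github | link_media_to_wikis.py | remove_section
-- ===== SOURCE A (Python) =====
-- def remove_section(content, header):
--     lines = content.splitlines()
--     new_lines = []
--     skip = False
--     for line in lines:
--         if header in line:
--             skip = True
--             continue
--         if skip:
--             # Stop skipping at next header or separator (but be careful not to catch list items)
--             s = line.strip()
--             if s.startswith("## ") or s.startswith("----") or s.startswith("```{") or s.startswith(":::{"):
--                 skip = False
--             else:
--                 continue
--         new_lines.append(line)
--     return "\n".join(new_lines)
-- ===== SOURCE B (Python) =====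
-- def remove_section(content, header):
--     # Stage 1: partition lines into tagged chunks. A chunk is (keep, body). A line
--     # containing the header closes the current chunk and opens a dropped one; a
--     # terminator line (not containing the header) closes it and opens a kept chunk
--     # that starts with the terminator itself; other lines extend the current body.
--     terms = ("## ", "----", "```{", ":::{")
--     chunks = []
--     keep, body = True, []
--     for line in content.splitlines():
--         if header in line:
--             chunks.append((keep, body))
--             keep, body = False, []
--         elif line.strip().startswith(terms):
--             chunks.append((keep, body))
--             keep, body = True, [line]
--         else:
--             body.append(line)
--     chunks.append((keep, body))
--     # Stage 2: keep only the kept chunks and flatten.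
--     return "\n".join(l for k, b in chunks if k for l in b)
-- ===== Notes on version B (the rewrite author's own statement) =====
-- stated objective: alternative
-- what changed: Replaces the flag-carrying single pass that emits lines one by one with a two-stage pipeline: first partition the lines into event-delimited chunks tagged keep/drop (header lines open dropped chunks, terminator lines open kept chunks), then filter the kept chunks and flatten them.
import Mathlib
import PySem

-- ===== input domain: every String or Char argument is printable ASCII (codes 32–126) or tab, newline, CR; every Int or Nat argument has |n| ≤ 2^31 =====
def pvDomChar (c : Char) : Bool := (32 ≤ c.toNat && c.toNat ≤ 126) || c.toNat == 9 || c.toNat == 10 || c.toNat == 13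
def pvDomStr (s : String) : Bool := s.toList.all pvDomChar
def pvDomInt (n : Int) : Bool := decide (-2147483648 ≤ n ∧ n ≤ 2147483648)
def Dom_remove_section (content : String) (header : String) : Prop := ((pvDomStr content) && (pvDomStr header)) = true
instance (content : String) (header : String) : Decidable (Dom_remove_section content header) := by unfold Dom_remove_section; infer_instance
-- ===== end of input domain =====

-- B replaces A's flag-carrying single pass with a two-stage pipeline (partition into
-- keep/drop-tagged chunks, then filter and flatten); same return value, same O(n) cost.

-- shared transliteration of the terminator test `line.strip().startswith(...) or ...`
def pvIsTerm (line : String) : Bool :=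
  let s := PySem.Str.strip line
  PySem.Str.startswith s "## " || PySem.Str.startswith s "----" ||
  PySem.Str.startswith s "```{" || PySem.Str.startswith s ":::{"

-- ===== PORT A =====
-- fold over the lines with state (new_lines, skip), branch for branch as in A
def remove_section (content : String) (header : String) : String :=
  let lines := PySem.Str.splitlines content
  let st := lines.foldl (fun (st : List String × Bool) line =>
    if PySem.Str.isIn header line then (st.1, true)
    else if st.2 then
      if pvIsTerm line then (st.1 ++ [line], false)
      else (st.1, true)
    else (st.1 ++ [line], false)) ([], false)
  PySem.Str.join "\n" st.1

-- ===== PORT B =====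
-- stage-1 step: state is (finished chunks, current keep tag, current body)
def pvChunkStep (header : String)
    (st : List (Bool × List String) × Bool × List String) (line : String) :
    List (Bool × List String) × Bool × List String :=
  if PySem.Str.isIn header line then (st.1 ++ [(st.2.1, st.2.2)], false, [])
  else if pvIsTerm line then (st.1 ++ [(st.2.1, st.2.2)], true, [line])
  else (st.1, st.2.1, st.2.2 ++ [line])

def remove_section_alt (content : String) (header : String) : String :=
  let st := (PySem.Str.splitlines content).foldl (pvChunkStep header) ([], true, [])
  let chunks := st.1 ++ [(st.2.1, st.2.2)]
  PySem.Str.join "\n" ((chunks.filter (fun c => c.1)).flatMap (fun c => c.2))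

-- ===== PRECONDITION & SPEC =====
def Spec_remove_section (content : String) (header : String) (out : String) : Prop := out = remove_section_alt content header
instance (content : String) (header : String) (out : String) : Decidable (Spec_remove_section content header out) := by unfold Spec_remove_section; infer_instance

-- ===== CLAIM (what is proved, stated in full; the proofs are below) =====
def Claim_equal_remove_section : Prop := ∀ (content : String) (header : String), Dom_remove_section content header → Spec_remove_section content header (remove_section content header)

-- ===== LEMMAS AND PROOFS =====

-- A's fold body, named for the lemmas
def pvStep (header : String) (st : List String × Bool) (line : String) : List String × Bool :=
  if PySem.Str.isIn header line then (st.1, true)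
  else if st.2 then
    if pvIsTerm line then (st.1 ++ [line], false)
    else (st.1, true)
  else (st.1 ++ [line], false)

-- the lines a chunk state denotes: kept chunks flattened, plus the current body if kept
def pvFlat (chunks : List (Bool × List String)) : List String :=
  (chunks.filter (fun c => c.1)).flatMap (fun c => c.2)

theorem pvFlat_append (c d : List (Bool × List String)) :
    pvFlat (c ++ d) = pvFlat c ++ pvFlat d := by
  simp [pvFlat, List.filter_append]

-- Invariant: A's fold state corresponds to B's chunk state throughout stage 1.
theorem pvBridge (header : String) (lines : List String) :
    ∀ (chunks : List (Bool × List String)) (keep : Bool) (body : List String),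
      (List.foldl (pvStep header)
          (pvFlat chunks ++ (if keep then body else []), !keep) lines).1
        = (let st := List.foldl (pvChunkStep header) (chunks, keep, body) lines
           pvFlat (st.1 ++ [(st.2.1, st.2.2)])) := by
  induction lines with
  | nil =>
    intro chunks keep body
    simp only [List.foldl_nil]
    cases keep <;> simp [pvFlat]
  | cons line rest ih =>
    intro chunks keep body
    simp only [List.foldl_cons, pvStep, pvChunkStep]
    by_cases hin : PySem.Str.isIn header line = true
    · simp only [hin, if_true]
      have := ih (chunks ++ [(keep, body)]) false []
      cases keep <;> simpa [pvFlat_append, pvFlat] using this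
    · simp only [hin, Bool.false_eq_true, if_false]
      by_cases ht : pvIsTerm line = true
      · -- terminator: both versions emit the line and stop skipping
        have := ih (chunks ++ [(keep, body)]) true [line]
        cases keep <;>
          simpa [hin, ht, pvFlat_append, pvFlat] using this
      · -- plain line: kept iff not skipping
        have := ih chunks keep (body ++ [line])
        cases keep <;>
          simpa [hin, ht, pvFlat_append, pvFlat] using this

-- ===== VERDICT (by name: the statement is the Claim_ definition above) =====
theorem remove_section_spec : Claim_equal_remove_section := by
  intro content header _
  unfold Spec_remove_section remove_section remove_section_alt
  have h := pvBridge header (PySem.Str.splitlines content) [] true []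
  simp only [pvFlat, List.filter_nil, List.flatMap_nil, List.nil_append, if_true,
    Bool.not_true] at h
  -- align the anonymous fold body of the port with pvStep
  have hb : (fun (st : List String × Bool) line =>
      if PySem.Str.isIn header line then (st.1, true)
      else if st.2 then
        if pvIsTerm line then (st.1 ++ [line], false)
        else (st.1, true)
      else (st.1 ++ [line], false)) = pvStep header := by
    funext st line; simp [pvStep]
  rw [hb]
  exact congrArg (PySem.Str.join "\n") h
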